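-- pv_equiv track=rewrite | github.com/Enthusela/WatchyChronometer | rotate_bitmaps.py | binary_image_to_char_array
-- ===== SOURCE A (Python) =====
-- def binary_image_to_char_array(binary_image):
--     rotated_hex_array = []
--     for row in binary_image:
--         for i in range(0, len(row), 8):
--             byte = 0x00
--             for j in range(8):
--                 if i + j < len(row) and row[i + j]:
--                     byte |= 1 << (7 - j)
--             rotated_hex_array.append(byte)
--
--     return rotated_hex_array
-- ===== SOURCE B (Python) =====
-- def binary_image_to_char_array(binary_image):
--     out = []
--     for row in binary_image:
--         byte = 0
--         count = 0
--         for pixel in row: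
--             byte = (byte << 1) | (1 if pixel else 0)
--             count += 1
--             if count == 8:
--                 out.append(byte)
--                 byte = 0
--                 count = 0
--         if count:
--             out.append(byte << (8 - count))
--     return out
-- ===== Notes on version B (the rewrite author's own statement) =====
-- stated objective: alternative
-- what changed: Replaces A's index-chunking (range(0,len,8) with an inner 8-iteration loop OR-ing 1<<(7-j) masks behind per-bit bounds checks) by a single streaming pass per row that shifts each pixel bit into an accumulator byte with a bit counter, flushing every 8 pixels and left-shifting the trailing partial byte.
import Mathlib
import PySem

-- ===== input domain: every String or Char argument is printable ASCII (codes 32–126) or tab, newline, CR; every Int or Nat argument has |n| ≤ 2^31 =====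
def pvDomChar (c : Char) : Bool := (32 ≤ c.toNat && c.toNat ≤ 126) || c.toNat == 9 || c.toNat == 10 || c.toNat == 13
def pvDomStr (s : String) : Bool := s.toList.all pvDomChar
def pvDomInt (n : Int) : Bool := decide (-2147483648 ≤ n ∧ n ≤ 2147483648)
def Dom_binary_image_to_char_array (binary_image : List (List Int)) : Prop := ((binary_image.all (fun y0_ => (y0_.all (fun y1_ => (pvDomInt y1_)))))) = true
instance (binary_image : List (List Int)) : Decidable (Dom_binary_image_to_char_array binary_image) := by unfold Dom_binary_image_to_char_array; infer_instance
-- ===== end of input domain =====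

-- B streams each row through a byte/bit-count accumulator instead of A's index-chunking with OR masks; same cost, different decomposition.

-- ===== PORT A =====
-- inner 'for j in range(8)' loop of A; (7 - j).toNat is exact: j ∈ range(8) so 0 ≤ 7 - j,
-- and the bounds guard makes pyGetD's default unreachable (0 ≤ i + j < len(row))
def aByte (row : List Int) (i : Int) : Int :=
  (PySem.List.pyRange 0 8 1).foldl
    (fun byte j =>
      if i + j < (row.length : Int) ∧ PySem.List.pyGetD row (i + j) 0 ≠ 0
      then PySem.Int.bor byte (1 <<< (7 - j).toNat)
      else byte) 0

def binary_image_to_char_array (binary_image : List (List Int)) : List Int :=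
  binary_image.foldl
    (fun acc row =>
      (PySem.List.pyRange 0 (row.length : Int) 8).foldl
        (fun acc2 i => acc2 ++ [aByte row i]) acc)
    []

-- ===== PORT B =====
-- one streaming step of Source B's inner loop; state = (out, byte, count)
def bStep (st : List Int × Int × Int) (pixel : Int) : List Int × Int × Int :=
  let byte := PySem.Int.bor (st.2.1 <<< (1 : Nat)) (if pixel ≠ 0 then 1 else 0)
  let count := st.2.2 + 1
  if count = 8 then (st.1 ++ [byte], 0, 0) else (st.1, byte, count)

-- one row of Source B: stream the pixels, then flush the trailing partial byte ((8 - count).toNat exact: 0 < count < 8)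
def bRow (out : List Int) (row : List Int) : List Int :=
  let st := row.foldl bStep (out, 0, 0)
  if st.2.2 ≠ 0 then st.1 ++ [st.2.1 <<< (8 - st.2.2).toNat] else st.1

def binary_image_to_char_array_alt (binary_image : List (List Int)) : List Int :=
  binary_image.foldl bRow []

-- ===== PRECONDITION & SPEC =====
def Spec_binary_image_to_char_array (binary_image : List (List Int)) (out : List Int) : Prop := out = binary_image_to_char_array_alt binary_image
instance (binary_image : List (List Int)) (out : List Int) : Decidable (Spec_binary_image_to_char_array binary_image out) := by unfold Spec_binary_image_to_char_array; infer_instance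

-- ===== CLAIM (what is proved, stated in full; the proofs are below) =====
def Claim_equal_binary_image_to_char_array : Prop := ∀ (binary_image : List (List Int)), Dom_binary_image_to_char_array binary_image → Spec_binary_image_to_char_array binary_image (binary_image_to_char_array binary_image)

-- ===== LEMMAS AND PROOFS =====

def bRowList (row : List Int) : List Int := bRow [] row
theorem bStep_eval (o : List Int) (b c x : Int) :
    bStep (o, b, c) x =
      if c + 1 = 8 then (o ++ [PySem.Int.bor (b <<< (1:Nat)) (if x ≠ 0 then 1 else 0)], 0, 0)
      else (o, PySem.Int.bor (b <<< (1:Nat)) (if x ≠ 0 then 1 else 0), c + 1) := rfl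
theorem bStep_shift (out p : List Int) (b c : Int) (x : Int) :
    bStep (out ++ p, b, c) x = (out ++ (bStep (p, b, c) x).1, (bStep (p, b, c) x).2) := by
  unfold bStep; dsimp only; split_ifs <;> simp
theorem bfold_shift (row : List Int) : ∀ (out p : List Int) (b c : Int),
    row.foldl bStep (out ++ p, b, c) =
      (out ++ (row.foldl bStep (p, b, c)).1, (row.foldl bStep (p, b, c)).2) := by
  induction row with
  | nil => intro out p b c; simp
  | cons x xs ih =>
    intro out p b c
    simp only [List.foldl_cons]
    rw [bStep_shift]
    rcases h : bStep (p, b, c) x with ⟨p', b', c'⟩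
    simpa using ih out p' b' c'
theorem pyRange8_cons (n : Int) (h : 0 < n) :
    PySem.List.pyRange 0 n 8 = 0 :: (PySem.List.pyRange 0 (n - 8) 8).map (fun i => 8 + i) := by
  rw [PySem.List.pyRange_of_pos 0 n (by norm_num), PySem.List.pyRange_of_pos 0 (n - 8) (by norm_num)]
  simp only [if_pos h]
  by_cases h8 : n - 8 < 1
  · rw [if_neg (by omega)]
    have hc : ((n - 0 + 8 - 1) / 8).toNat = 1 := by omega
    rw [hc]; simp
  · rw [if_pos (by omega)]
    have hc : ((n - 0 + 8 - 1) / 8).toNat = ((n - 8 - 0 + 8 - 1) / 8).toNat + 1 := by omega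
    rw [hc, List.range_succ_eq_map]
    simp only [List.map_cons, List.map_map]
    norm_num
    intro a _
    ring
theorem aByte_shift (x0 x1 x2 x3 x4 x5 x6 x7 : Int) (rest : List Int) (i : Int) (hi : 0 ≤ i) :
    aByte (x0::x1::x2::x3::x4::x5::x6::x7::rest) (8 + i) = aByte rest i := by
  unfold aByte
  refine PySem.List.foldl_congr_mem _ _ _ _ ?_
  intro acc j hj
  rw [PySem.List.mem_pyRange_one] at hj
  have hget : PySem.List.pyGetD (x0::x1::x2::x3::x4::x5::x6::x7::rest) (8 + i + j) 0
      = PySem.List.pyGetD rest (i + j) 0 := by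
    obtain ⟨m, hm⟩ : ∃ m : Nat, i + j = (m : Int) := ⟨(i + j).toNat, by omega⟩
    have h1 : 8 + i + j = ((m + 8 : Nat) : Int) := by push_cast; omega
    rw [h1, hm, PySem.List.pyGetD_natCast, PySem.List.pyGetD_natCast]
    simp [List.getD]
  have hlen : (8 + i + j < ((x0::x1::x2::x3::x4::x5::x6::x7::rest).length : Int))
      ↔ (i + j < (rest.length : Int)) := by
    simp only [List.length_cons]; push_cast; omega
  rw [hget]
  by_cases hc : i + j < (rest.length : Int) ∧ PySem.List.pyGetD rest (i + j) 0 ≠ 0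
  · rw [if_pos ⟨hlen.mpr hc.1, hc.2⟩, if_pos hc]
  · rw [if_neg (fun h => hc ⟨hlen.mp h.1, h.2⟩), if_neg hc]
set_option maxHeartbeats 1000000 in
theorem headEq (x0 x1 x2 x3 x4 x5 x6 x7 : Int) (rest : List Int) :
    [aByte (x0::x1::x2::x3::x4::x5::x6::x7::rest) 0]
      = ([x0,x1,x2,x3,x4,x5,x6,x7].foldl bStep (([]:List Int),(0:Int),(0:Int))).1 := by
  have h1 : aByte (x0::x1::x2::x3::x4::x5::x6::x7::rest) 0
      = (PySem.List.pyRange 0 8 1).foldl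
          (fun byte j =>
            if PySem.List.pyGetD (x0::x1::x2::x3::x4::x5::x6::x7::rest) j 0 ≠ 0
            then PySem.Int.bor byte (1 <<< (7 - j).toNat)
            else byte) 0 := by
    unfold aByte
    refine PySem.List.foldl_congr_mem _ _ _ _ ?_
    intro acc j hj
    rw [PySem.List.mem_pyRange_one] at hj
    have hb : 0 + j < ((x0::x1::x2::x3::x4::x5::x6::x7::rest).length : Int) := by
      simp only [List.length_cons]; push_cast; omega
    rw [zero_add] at hb ⊢
    by_cases hg : PySem.List.pyGetD (x0::x1::x2::x3::x4::x5::x6::x7::rest) j 0 ≠ 0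
    · rw [if_pos ⟨hb, hg⟩, if_pos hg]
    · rw [if_neg (fun h => hg h.2), if_neg hg]
  rw [h1]
  norm_num [show PySem.List.pyRange 0 8 1 = [0,1,2,3,4,5,6,7] from by decide, List.foldl,
    PySem.List.pyGetD_ofNat', List.getD, bStep_eval, ite_not]
  split_ifs <;> decide
set_option maxHeartbeats 1000000 in
theorem bRowList_cons8 (x0 x1 x2 x3 x4 x5 x6 x7 : Int) (rest : List Int) :
    bRowList (x0::x1::x2::x3::x4::x5::x6::x7::rest)
      = ([x0,x1,x2,x3,x4,x5,x6,x7].foldl bStep (([]:List Int),(0:Int),(0:Int))).1 ++ bRowList rest := by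
  unfold bRowList bRow
  rw [show (x0::x1::x2::x3::x4::x5::x6::x7::rest) = [x0,x1,x2,x3,x4,x5,x6,x7] ++ rest from rfl,
      List.foldl_append]
  have hst : ([x0,x1,x2,x3,x4,x5,x6,x7].foldl bStep (([]:List Int),(0:Int),(0:Int)))
      = (([x0,x1,x2,x3,x4,x5,x6,x7].foldl bStep (([]:List Int),(0:Int),(0:Int))).1, 0, 0) := by
    norm_num [List.foldl, bStep_eval]
  rw [hst,
      show ((([x0,x1,x2,x3,x4,x5,x6,x7].foldl bStep (([]:List Int),(0:Int),(0:Int))).1 : List Int), (0:Int), (0:Int))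
        = (([x0,x1,x2,x3,x4,x5,x6,x7].foldl bStep (([]:List Int),(0:Int),(0:Int))).1 ++ [], (0:Int), (0:Int)) from by simp,
      bfold_shift]
  dsimp only
  split_ifs <;> simp
theorem consEq (x0 x1 x2 x3 x4 x5 x6 x7 : Int) (rest : List Int) :
    aByte (x0::x1::x2::x3::x4::x5::x6::x7::rest) 0 :: bRowList rest
      = bRowList (x0::x1::x2::x3::x4::x5::x6::x7::rest) := by
  rw [bRowList_cons8, ← headEq x0 x1 x2 x3 x4 x5 x6 x7 rest]
  simp

set_option maxHeartbeats 1000000 in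
theorem rowEq : ∀ (row : List Int),
    (PySem.List.pyRange 0 (row.length : Int) 8).map (aByte row) = bRowList row
  | [] => by decide
  | [x0] => by
    rw [show ((([x0] : List Int).length : Nat) : Int) = (1:Int) from by norm_num,
        show PySem.List.pyRange 0 (1:Int) 8 = [0] from by decide, List.map_cons, List.map_nil]
    unfold bRowList bRow aByte
    norm_num [show PySem.List.pyRange 0 8 1 = [0,1,2,3,4,5,6,7] from by decide, List.foldl,
      PySem.List.pyGetD_ofNat', List.getD, bStep_eval, ite_not]
    split_ifs <;> decide
  | [x0,x1] => by
    rw [show ((([x0,x1] : List Int).length : Nat) : Int) = (2:Int) from by norm_num,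
        show PySem.List.pyRange 0 (2:Int) 8 = [0] from by decide, List.map_cons, List.map_nil]
    unfold bRowList bRow aByte
    norm_num [show PySem.List.pyRange 0 8 1 = [0,1,2,3,4,5,6,7] from by decide, List.foldl,
      PySem.List.pyGetD_ofNat', List.getD, bStep_eval, ite_not]
    split_ifs <;> decide
  | [x0,x1,x2] => by
    rw [show ((([x0,x1,x2] : List Int).length : Nat) : Int) = (3:Int) from by norm_num,
        show PySem.List.pyRange 0 (3:Int) 8 = [0] from by decide, List.map_cons, List.map_nil]
    unfold bRowList bRow aByte
    norm_num [show PySem.List.pyRange 0 8 1 = [0,1,2,3,4,5,6,7] from by decide, List.foldl,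
      PySem.List.pyGetD_ofNat', List.getD, bStep_eval, ite_not]
    split_ifs <;> decide
  | [x0,x1,x2,x3] => by
    rw [show ((([x0,x1,x2,x3] : List Int).length : Nat) : Int) = (4:Int) from by norm_num,
        show PySem.List.pyRange 0 (4:Int) 8 = [0] from by decide, List.map_cons, List.map_nil]
    unfold bRowList bRow aByte
    norm_num [show PySem.List.pyRange 0 8 1 = [0,1,2,3,4,5,6,7] from by decide, List.foldl,
      PySem.List.pyGetD_ofNat', List.getD, bStep_eval, ite_not]
    split_ifs <;> decide
  | [x0,x1,x2,x3,x4] => by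
    rw [show ((([x0,x1,x2,x3,x4] : List Int).length : Nat) : Int) = (5:Int) from by norm_num,
        show PySem.List.pyRange 0 (5:Int) 8 = [0] from by decide, List.map_cons, List.map_nil]
    unfold bRowList bRow aByte
    norm_num [show PySem.List.pyRange 0 8 1 = [0,1,2,3,4,5,6,7] from by decide, List.foldl,
      PySem.List.pyGetD_ofNat', List.getD, bStep_eval, ite_not]
    split_ifs <;> decide
  | [x0,x1,x2,x3,x4,x5] => by
    rw [show ((([x0,x1,x2,x3,x4,x5] : List Int).length : Nat) : Int) = (6:Int) from by norm_num,
        show PySem.List.pyRange 0 (6:Int) 8 = [0] from by decide, List.map_cons, List.map_nil]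
    unfold bRowList bRow aByte
    norm_num [show PySem.List.pyRange 0 8 1 = [0,1,2,3,4,5,6,7] from by decide, List.foldl,
      PySem.List.pyGetD_ofNat', List.getD, bStep_eval, ite_not]
    split_ifs <;> decide
  | [x0,x1,x2,x3,x4,x5,x6] => by
    rw [show ((([x0,x1,x2,x3,x4,x5,x6] : List Int).length : Nat) : Int) = (7:Int) from by norm_num,
        show PySem.List.pyRange 0 (7:Int) 8 = [0] from by decide, List.map_cons, List.map_nil]
    unfold bRowList bRow aByte
    norm_num [show PySem.List.pyRange 0 8 1 = [0,1,2,3,4,5,6,7] from by decide, List.foldl,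
      PySem.List.pyGetD_ofNat', List.getD, bStep_eval, ite_not]
    split_ifs <;> decide
  | x0::x1::x2::x3::x4::x5::x6::x7::rest => by
    have hlen : (((x0::x1::x2::x3::x4::x5::x6::x7::rest).length : Nat) : Int)
        = (rest.length : Int) + 8 := by
      simp only [List.length_cons]; push_cast; ring
    rw [hlen, pyRange8_cons _ (by omega),
        show (rest.length : Int) + 8 - 8 = (rest.length : Int) from by ring,
        List.map_cons, List.map_map]
    have htail : (PySem.List.pyRange 0 (rest.length : Int) 8).map
          (aByte (x0::x1::x2::x3::x4::x5::x6::x7::rest) ∘ fun i => 8 + i)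
        = (PySem.List.pyRange 0 (rest.length : Int) 8).map (aByte rest) := by
      refine List.map_congr_left ?_
      intro i hi
      have h0i : 0 ≤ i := ((PySem.List.mem_pyRange_iff_of_pos (by norm_num) i).mp hi).1
      simpa using aByte_shift x0 x1 x2 x3 x4 x5 x6 x7 rest i h0i
    rw [htail, rowEq rest]
    exact consEq x0 x1 x2 x3 x4 x5 x6 x7 rest

-- B's whole-row output is independent of the accumulated prefix
theorem bRow_shift (out row : List Int) : bRow out row = out ++ bRowList row := by
  unfold bRowList bRow
  rw [show ((out, (0 : Int), (0 : Int))) = ((out ++ [], 0, 0)) by simp,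
      show (([] : List Int), (0 : Int), (0 : Int)) = (([] : List Int) ++ [], 0, 0) by simp,
      bfold_shift, bfold_shift]
  simp only [List.nil_append]
  split_ifs <;> simp

-- ===== VERDICT (by name: the statement is the Claim_ definition above) =====
theorem binary_image_to_char_array_spec : Claim_equal_binary_image_to_char_array := by
  intro img _
  unfold Spec_binary_image_to_char_array binary_image_to_char_array binary_image_to_char_array_alt
  induction img using List.reverseRecOn with
  | nil => rfl
  | append_singleton xs row ih =>
    rename_i hdom
    have hxs : Dom_binary_image_to_char_array xs := by
      simp only [Dom_binary_image_to_char_array, List.all_append, Bool.and_eq_true] at hdom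
      exact hdom.1
    rw [List.foldl_append, List.foldl_append, List.foldl_cons, List.foldl_nil,
        List.foldl_cons, List.foldl_nil, ih hxs,
        PySem.List.foldl_append_singleton_eq_map, bRow_shift, rowEq]
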